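-- pv_equiv track=rewrite | github.com/jramaswami/Binary_Search_Python | stuck_keyboard.py | solve
-- ===== SOURCE A (Python) =====
-- def solve(typed, target):
--     typed_p = 0
--     target_p = 0
--     while typed_p < len(typed):
--         if target_p < len(target) and typed[typed_p] == target[target_p]:
--             typed_p += 1
--             target_p += 1
--         elif typed_p > 0 and typed[typed_p] == typed[typed_p - 1]:
--             typed_p += 1
--         else:
--             return False
--     return target_p >= len(target)
-- ===== SOURCE B (Python) =====
-- def _rle(s):
--     # run-length encode: list of (char, run_length) groups, left to right
--     groups = []
--     i = 0
--     n = len(s)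
--     while i < n:
--         j = i + 1
--         while j < n and s[j] == s[i]:
--             j += 1
--         groups.append((s[i], j - i))
--         i = j
--     return groups
--
-- def solve(typed, target):
--     gt = _rle(typed)
--     gg = _rle(target)
--     if len(gt) != len(gg):
--         return False
--     return all(c == d and n <= m for (c, m), (d, n) in zip(gt, gg))
-- ===== Notes on version B (the rewrite author's own statement) =====
-- stated objective: alternative
-- what changed: Replaces the interleaved two-pointer scan with a run-length encoding of both strings followed by a groupwise comparison (equal group count, equal chars, typed run length >= target run length).
import Mathlib
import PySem

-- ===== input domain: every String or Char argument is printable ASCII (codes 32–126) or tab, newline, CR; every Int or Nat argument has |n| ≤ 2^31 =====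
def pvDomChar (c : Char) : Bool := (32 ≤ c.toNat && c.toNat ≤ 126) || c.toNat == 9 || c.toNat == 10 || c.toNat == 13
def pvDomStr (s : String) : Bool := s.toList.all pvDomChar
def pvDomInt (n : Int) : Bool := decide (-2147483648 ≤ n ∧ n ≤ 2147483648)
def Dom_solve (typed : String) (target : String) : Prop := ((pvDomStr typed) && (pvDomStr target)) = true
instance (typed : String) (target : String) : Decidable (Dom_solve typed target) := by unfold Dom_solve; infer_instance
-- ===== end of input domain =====

-- B replaces A's interleaved two-pointer scan by run-length encoding both strings and
-- comparing the groups; same asymptotic cost, different algorithm (objective: alternative).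

-- ===== PORT A =====
-- A's while loop over the two indices; the guards ensure every index is in range,
-- so getD's default is never consulted.
def solveLoop (typed target : List Char) (tp gp : Nat) : Bool :=
  if tp < typed.length then
    if gp < target.length && (typed.getD tp ' ' == target.getD gp ' ') then
      solveLoop typed target (tp + 1) (gp + 1)
    else if decide (0 < tp) && (typed.getD tp ' ' == typed.getD (tp - 1) ' ') then
      solveLoop typed target (tp + 1) gp
    else
      false
  else
    decide (target.length ≤ gp)
termination_by typed.length - tp

def solve (typed : String) (target : String) : Bool :=
  solveLoop typed.toList target.toList 0 0

-- ===== PORT B =====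
-- run-length encoding: leading run (via the inner while = takeWhile/dropWhile), then recurse
def rle : List Char → List (Char × Nat)
  | [] => []
  | c :: cs => (c, (cs.takeWhile (· == c)).length + 1) :: rle (cs.dropWhile (· == c))
termination_by l => l.length
decreasing_by
  exact Nat.lt_succ_of_le (List.length_dropWhile_le _ _)

def solve_alt (typed : String) (target : String) : Bool :=
  let gt := rle typed.toList
  let gg := rle target.toList
  if gt.length ≠ gg.length then false
  else (gt.zip gg).all (fun p => p.1.1 == p.2.1 && decide (p.2.2 ≤ p.1.2))

-- ===== PRECONDITION & SPEC =====
def Spec_solve (typed : String) (target : String) (out : Bool) : Prop := out = solve_alt typed target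
instance (typed : String) (target : String) (out : Bool) : Decidable (Spec_solve typed target out) := by unfold Spec_solve; infer_instance

-- ===== CLAIM (what is proved, stated in full; the proofs are below) =====
def Claim_equal_solve : Prop := ∀ (typed : String) (target : String), Dom_solve typed target → Spec_solve typed target (solve typed target)

-- ===== LEMMAS AND PROOFS =====

-- intermediate recursive matcher: 'prev' is the previously typed char (A's typed[tp-1])
def fmatch (prev : Option Char) : List Char → List Char → Bool
  | [], gs => gs.isEmpty
  | c :: ts, [] => if prev == some c then fmatch (some c) ts [] else false
  | c :: ts, d :: gs =>
      if c == d then fmatch (some c) ts gs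
      else if prev == some c then fmatch (some c) ts (d :: gs) else false

-- grouped comparison in recursive form
def chk : List (Char × Nat) → List (Char × Nat) → Bool
  | [], [] => true
  | (c, m) :: ts, (d, n) :: gs => c == d && decide (n ≤ m) && chk ts gs
  | _, _ => false

theorem chk_eq (a b : List (Char × Nat)) :
    chk a b = (!decide (a.length ≠ b.length) &&
      (a.zip b).all (fun p => p.1.1 == p.2.1 && decide (p.2.2 ≤ p.1.2))) := by
  induction a generalizing b with
  | nil => cases b <;> simp [chk]
  | cons x a ih =>
    cases b with
    | nil => simp [chk]
    | cons y b =>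
      obtain ⟨c, m⟩ := x; obtain ⟨d, n⟩ := y
      simp [chk, ih b]
      by_cases h1 : c = d <;> by_cases h2 : n ≤ m <;> by_cases h3 : a.length = b.length <;>
        simp [h1, h2, h3]

-- prev is irrelevant when it differs from the head of ts
theorem fmatch_none (p : Char) (ts gs : List Char) (h : ts.head? ≠ some p) :
    fmatch (some p) ts gs = fmatch none ts gs := by
  cases ts with
  | nil => cases gs <;> simp [fmatch]
  | cons c ts =>
    have hc : ¬ (p = c) := by intro he; exact h (by simp [he])
    cases gs with
    | nil => simp [fmatch, hc]
    | cons d gs =>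
      by_cases hcd : c = d <;> simp [fmatch, hcd, hc]

-- run consumption: fmatch (some c) eats the leading c-runs of both lists, requiring
-- the target run to be no longer than the typed run
theorem fmatch_run (c : Char) (ts : List Char) : ∀ gs : List Char,
    fmatch (some c) ts gs =
      (decide ((gs.takeWhile (· == c)).length ≤ (ts.takeWhile (· == c)).length) &&
        fmatch (some c) (ts.dropWhile (· == c)) (gs.dropWhile (· == c))) := by
  induction ts with
  | nil =>
    intro gs
    cases gs with
    | nil => simp [fmatch]
    | cons d gs =>
      by_cases hdc : d = c
      · simp [fmatch, hdc]
      · simp [fmatch, hdc]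
  | cons t ts ih =>
    intro gs
    by_cases htc : t = c
    · cases gs with
      | nil =>
        simp [fmatch, htc, ih []]
      | cons d gs =>
        by_cases hdc : d = c
        · simp [fmatch, htc, hdc, ih gs]
        · simp [fmatch, htc, hdc, Ne.symm hdc, ih (d :: gs)]
    · cases gs with
      | nil =>
        simp [fmatch, htc, Ne.symm htc]
      | cons d gs =>
        by_cases hdc : d = c
        · simp [fmatch, htc, hdc, Ne.symm htc]
        · simp [htc, hdc]

theorem head?_dropWhile_ne (c : Char) (l : List Char) :
    (l.dropWhile (· == c)).head? ≠ some c := by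
  induction l with
  | nil => simp
  | cons x l ih =>
    by_cases h : x = c
    · simpa [h] using ih
    · simp [h]

-- main bridge: the recursive matcher equals the grouped comparison
theorem fmatch_eq_chk (ts : List Char) : ∀ gs : List Char,
    fmatch none ts gs = chk (rle ts) (rle gs) := by
  induction ts using rle.induct with
  | case1 =>
    intro gs
    cases gs <;> simp [fmatch, rle, chk, List.isEmpty]
  | case2 c ts ih =>
    intro gs
    cases gs with
    | nil => simp [fmatch, rle, chk]
    | cons d gs =>
      by_cases hcd : c = d
      · subst hcd
        have hrun := fmatch_run c ts gs
        have hnone := fmatch_none c (ts.dropWhile (· == c)) (gs.dropWhile (· == c))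
          (head?_dropWhile_ne c ts)
        simp only [fmatch, rle, chk]
        rw [hrun, hnone, ih]
        simp
      · simp [fmatch, rle, chk, hcd]

-- bridge from A's index loop to the recursive matcher
theorem solveLoop_eq_fmatch (typed target : List Char) : ∀ tp gp : Nat,
    tp ≤ typed.length → gp ≤ target.length →
    solveLoop typed target tp gp =
      fmatch (if 0 < tp then some (typed.getD (tp - 1) ' ') else none)
        (typed.drop tp) (target.drop gp) := by
  intro tp
  induction hfu : typed.length - tp using Nat.strong_induction_on generalizing tp with
  | _ n ihn =>
  intro gp htp hgp
  by_cases h : tp < typed.length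
  · have h1 : tp - 1 < typed.length := by omega
    have hdt : typed.drop tp = typed[tp] :: typed.drop (tp + 1) :=
      (List.getElem_cons_drop h).symm
    have ih1 := ihn (typed.length - (tp + 1)) (by omega) (tp + 1) rfl
    rw [solveLoop, hdt]
    rw [if_pos h]
    by_cases hg : gp < target.length
    · have hdg : target.drop gp = target[gp] :: target.drop (gp + 1) :=
        (List.getElem_cons_drop hg).symm
      rw [hdg]
      by_cases heq : typed[tp] = target[gp]
      · rw [if_pos (by simp [List.getD, List.getElem?_eq_getElem h,
          hg, heq])]
        rw [ih1 (gp + 1) (by omega) (by omega)]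
        simp [fmatch, heq, List.getD, List.getElem?_eq_getElem h]
      · rw [if_neg (by simp [List.getD, List.getElem?_eq_getElem h,
          List.getElem?_eq_getElem hg]; intro _; exact heq)]
        by_cases hsk : 0 < tp ∧ typed[tp] = typed[tp - 1]
        · rw [if_pos (by simp [List.getD, List.getElem?_eq_getElem h,
            List.getElem?_eq_getElem h1, hsk.1, hsk.2])]
          rw [ih1 gp (by omega) hgp, hdg]
          simp [fmatch, heq, hsk.1, hsk.2.symm, List.getD,
            List.getElem?_eq_getElem h, List.getElem?_eq_getElem h1]
        · rw [if_neg (by simp [List.getD, List.getElem?_eq_getElem h,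
            List.getElem?_eq_getElem h1]; intro h0 hsame; exact hsk ⟨h0, hsame⟩)]
          by_cases h0 : 0 < tp
          · have hne : ¬ typed[tp] = typed[tp - 1] := fun hh => hsk ⟨h0, hh⟩
            have hne' : ¬ typed[tp - 1] = typed[tp] := fun hh => hne hh.symm
            simp [fmatch, heq, h0, List.getD, List.getElem?_eq_getElem h1, hne']
          · simp [fmatch, heq, h0]
    · have hdg : target.drop gp = [] := by
        simp [show gp = target.length from by omega]
      rw [hdg]
      rw [if_neg (by simp [hg])]
      by_cases hsk : 0 < tp ∧ typed[tp] = typed[tp - 1]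
      · rw [if_pos (by simp [List.getD, List.getElem?_eq_getElem h,
          List.getElem?_eq_getElem h1, hsk.1, hsk.2])]
        rw [ih1 gp (by omega) hgp, hdg]
        simp [fmatch, hsk.1, hsk.2.symm, List.getD,
          List.getElem?_eq_getElem h, List.getElem?_eq_getElem h1]
      · rw [if_neg (by simp [List.getD, List.getElem?_eq_getElem h,
          List.getElem?_eq_getElem h1]; intro h0 hsame; exact hsk ⟨h0, hsame⟩)]
        by_cases h0 : 0 < tp
        · have hne : ¬ typed[tp] = typed[tp - 1] := fun hh => hsk ⟨h0, hh⟩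
          have hne' : ¬ typed[tp - 1] = typed[tp] := fun hh => hne hh.symm
          simp [fmatch, h0, List.getD, List.getElem?_eq_getElem h1, hne']
        · simp [fmatch, h0]
  · have hdt : typed.drop tp = [] := by
      simp [show tp = typed.length from by omega]
    rw [solveLoop, if_neg h, hdt]
    cases hdg : target.drop gp with
    | nil =>
      have hlen : target.length ≤ gp := by
        have := congrArg List.length hdg; simp at this; omega
      simp [fmatch, hlen]
    | cons d gs =>
      have hlen : ¬ target.length ≤ gp := by
        have := congrArg List.length hdg; simp at this; omega
      simp [fmatch, hlen]

-- ===== VERDICT (by name: the statement is the Claim_ definition above) =====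
theorem solve_spec : Claim_equal_solve := by
  intro typed target _
  unfold Spec_solve solve solve_alt
  rw [solveLoop_eq_fmatch typed.toList target.toList 0 0 (by omega) (by omega)]
  simp only [List.drop_zero, if_neg (by omega : ¬ 0 < 0)]
  rw [fmatch_eq_chk, chk_eq]
  simp
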